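-- pv_equiv track=rewrite | github.com/johnwroge/advent_of_code | 2024/Day_23/Solution.py | find_largest_clique
-- ===== SOURCE A (Python) =====
-- def find_largest_clique(graph):
--     def greedy_clique():
--         sorted_nodes = sorted(graph.keys(), key=lambda x: len(graph[x]), reverse=True)
--         best_clique = []
--         for start_node in sorted_nodes:
--             current_clique = [start_node]
--             for node in sorted_nodes:
--                 if node not in current_clique:
--                     if all(node in graph[clique_node] for clique_node in current_clique):
--                         current_clique.append(node)
--             if len(current_clique) > len(best_clique):
--                 best_clique = current_clique
--         return best_clique
--     largest_clique = greedy_clique()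
--     return ','.join(sorted(largest_clique)) if largest_clique else ''
-- ===== SOURCE B (Python) =====
-- def find_largest_clique(graph):
--     order = sorted(graph, key=lambda x: len(graph[x]), reverse=True)
--
--     def grow(clique, cands, nodes):
--         # candidate set = common neighbours of the clique so far
--         if not nodes:
--             return clique
--         node, rest = nodes[0], nodes[1:]
--         if node in cands and node not in clique:
--             return grow(clique + [node], cands & set(graph[node]), rest)
--         return grow(clique, cands, rest)
--
--     best = max((grow([s], set(graph[s]), order) for s in order), key=len, default=[])
--     return ','.join(sorted(best)) if best else ''
-- ===== Notes on version B (the rewrite author's own statement) =====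
-- stated objective: alternative
-- what changed: B replaces A's fold with per-candidate rescans of every clique member's adjacency list by a recursive grow over the node list that maintains one intersected candidate set, and picks the best clique with max(key=len) over a mapped list instead of A's running-best accumulator loop.
import Mathlib
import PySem

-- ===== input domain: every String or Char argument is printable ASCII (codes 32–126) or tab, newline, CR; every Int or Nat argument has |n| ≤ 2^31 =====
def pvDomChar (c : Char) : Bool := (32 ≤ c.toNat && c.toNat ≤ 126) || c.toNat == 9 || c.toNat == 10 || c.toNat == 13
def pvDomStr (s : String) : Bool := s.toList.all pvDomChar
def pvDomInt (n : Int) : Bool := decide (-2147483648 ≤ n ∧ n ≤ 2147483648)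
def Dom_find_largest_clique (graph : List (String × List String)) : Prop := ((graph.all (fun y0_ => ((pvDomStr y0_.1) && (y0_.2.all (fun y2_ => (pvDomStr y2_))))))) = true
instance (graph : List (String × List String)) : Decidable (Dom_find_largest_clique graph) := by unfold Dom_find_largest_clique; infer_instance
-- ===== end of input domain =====

-- B grows each clique by recursion over the node list with one intersected candidate set
-- (instead of A's per-node rescan of every clique member's adjacency list) and takes the
-- longest clique with max(key=len) instead of A's running-best fold; same greedy result.


-- ===== PORT A =====
-- inner loop of greedy_clique: for node in sorted_nodes: if node not in current_clique:
--   if all(node in graph[clique_node] for clique_node in current_clique): current_clique.append(node)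
def pvStepA (d : PySem.Dict String (List String)) (cur : List String) (node : String) : List String :=
  if node ∈ cur then cur
  else if ∀ c ∈ cur, node ∈ d.getD c [] then cur ++ [node]
  else cur

def find_largest_clique (graph : List (String × List String)) : String :=
  let d := PySem.Dict.ofList graph
  let sorted_nodes := PySem.List.sorted d.keys (fun x => (d.getD x []).length) true
  let best_clique := sorted_nodes.foldl
    (fun best_clique start_node =>
      let current_clique := sorted_nodes.foldl (pvStepA d) [start_node]
      if current_clique.length > best_clique.length then current_clique else best_clique)
    []
  if best_clique ≠ [] then PySem.Str.join "," (PySem.List.sorted best_clique (fun x => x) false)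
  else ""

-- ===== PORT B =====
-- def grow(clique, cands, nodes): recursion on the remaining node list, one candidate set
def pvGrow (d : PySem.Dict String (List String)) (clique : List String)
    (cands : PySem.Set String) : List String → List String
  | [] => clique
  | node :: rest =>
    if PySem.Set.contains cands node ∧ node ∉ clique then
      pvGrow d (clique ++ [node]) (PySem.Set.inter cands (d.getD node [])) rest
    else pvGrow d clique cands rest

def find_largest_clique_alt (graph : List (String × List String)) : String :=
  let d := PySem.Dict.ofList graph
  let order := PySem.List.sorted d.keys (fun x => (d.getD x []).length) true
  let best := PySem.List.maxD
    (order.map (fun s => pvGrow d [s] (PySem.Set.ofList (d.getD s [])) order))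
    (fun c => c.length) []
  if best ≠ [] then PySem.Str.join "," (PySem.List.sorted best (fun x => x) false)
  else ""

-- ===== PRECONDITION & SPEC =====
def Spec_find_largest_clique (graph : List (String × List String)) (out : String) : Prop := out = find_largest_clique_alt graph
instance (graph : List (String × List String)) (out : String) : Decidable (Spec_find_largest_clique graph out) := by unfold Spec_find_largest_clique; infer_instance

-- ===== CLAIM (what is proved, stated in full; the proofs are below) =====
def Claim_equal_find_largest_clique : Prop := ∀ (graph : List (String × List String)), Dom_find_largest_clique graph → Spec_find_largest_clique graph (find_largest_clique graph)

-- ===== LEMMAS AND PROOFS =====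

-- Invariant of B's recursion: the candidate set holds exactly the common neighbours of the
-- clique so far; then pvGrow computes exactly A's inner fold.
theorem pvGrow_eq_foldl (d : PySem.Dict String (List String)) (nodes : List String)
    (cl : List String) (cand : PySem.Set String)
    (h : ∀ x, x ∈ cand ↔ ∀ c ∈ cl, x ∈ d.getD c []) :
    pvGrow d cl cand nodes = nodes.foldl (pvStepA d) cl := by
  induction nodes generalizing cl cand with
  | nil => rfl
  | cons node rest ih =>
    simp only [pvGrow, List.foldl_cons]
    by_cases hmem : node ∈ cl
    · have hA : pvStepA d cl node = cl := by unfold pvStepA; simp [hmem]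
      rw [if_neg (by simp [hmem]), hA]; exact ih cl cand h
    · by_cases hall : ∀ c ∈ cl, node ∈ d.getD c []
      · have hc : (PySem.Set.contains cand node ∧ node ∉ cl) := by
          refine ⟨?_, hmem⟩
          have : node ∈ cand := (h node).mpr hall
          simpa [PySem.Set.contains] using this
        have hA : pvStepA d cl node = cl ++ [node] := by
          unfold pvStepA; rw [if_neg hmem, if_pos hall]
        rw [if_pos hc, hA]
        refine ih (cl ++ [node]) _ (fun x => ?_)
        rw [PySem.Set.mem_inter, h x]
        constructor
        · rintro ⟨h1, h2⟩ c hcm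
          rcases List.mem_append.mp hcm with hcm | hcm
          · exact h1 c hcm
          · simp at hcm; subst hcm; exact h2
        · intro hx
          exact ⟨fun c hcm => hx c (List.mem_append.mpr (Or.inl hcm)),
                 hx node (by simp)⟩
      · have hA : pvStepA d cl node = cl := by
          unfold pvStepA; rw [if_neg hmem, if_neg hall]
        have hnc : ¬ (PySem.Set.contains cand node ∧ node ∉ cl) := by
          rintro ⟨h1, _⟩
          have : node ∈ cand := by simpa [PySem.Set.contains] using h1
          exact hall ((h node).mp this)
        rw [if_neg hnc, hA]; exact ih cl cand h

-- A's inner fold never shrinks the clique, so each grown clique is nonempty.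
theorem foldlA_ne_nil (d : PySem.Dict String (List String)) (nodes : List String)
    (cl : List String) (h : cl ≠ []) : nodes.foldl (pvStepA d) cl ≠ [] := by
  induction nodes generalizing cl with
  | nil => exact h
  | cons node rest ih =>
    simp only [List.foldl_cons]
    refine ih _ ?_
    unfold pvStepA
    split_ifs <;> simp_all

-- max? of a nonempty list by length is A's running-best fold (ties keep the earlier).
theorem max?_cons_getD (cs : List (List String)) (b : List String) :
    (PySem.List.max? (b :: cs) (fun c => c.length)).getD []
    = cs.foldl (fun best c => if best.length < c.length then c else best) b := by
  induction cs generalizing b with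
  | nil => rfl
  | cons c rest ih =>
    have h1 : PySem.List.max? (b :: c :: rest) (fun c => c.length)
        = PySem.List.max? ((if b.length < c.length then c else b) :: rest)
            (fun c => c.length) := by
      by_cases hbc : b.length < c.length <;> simp [PySem.List.max?, hbc]
    rw [h1, ih, List.foldl_cons]

-- maxD over a list of nonempty cliques with default [] is A's running-best fold from [].
theorem maxD_eq_foldl (cs : List (List String)) (hne : ∀ c ∈ cs, c ≠ []) :
    PySem.List.maxD cs (fun c => c.length) []
    = cs.foldl (fun best c => if best.length < c.length then c else best) [] := by
  cases cs with
  | nil => rfl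
  | cons c rest =>
    have hlen : 0 < c.length := List.length_pos_iff.mpr (hne c (by simp))
    have h0 : List.foldl (fun best c => if best.length < c.length then c else best)
        [] (c :: rest)
        = List.foldl (fun best c => if best.length < c.length then c else best) c rest := by
      simp only [List.foldl_cons, List.length_nil, if_pos hlen]
    rw [h0, ← max?_cons_getD]
    rfl

-- One rewrite from B's whole body to A's whole fold, for any dict and node order.
theorem bigstep (d : PySem.Dict String (List String)) (order : List String) :
    PySem.List.maxD
      (order.map (fun s => pvGrow d [s] (PySem.Set.ofList (d.getD s [])) order))
      (fun c => c.length) []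
    = order.foldl
        (fun best_clique start_node =>
          if (order.foldl (pvStepA d) [start_node]).length > best_clique.length then
            order.foldl (pvStepA d) [start_node]
          else best_clique)
        [] := by
  have key : ∀ start : String,
      pvGrow d [start] (PySem.Set.ofList (d.getD start [])) order
      = order.foldl (pvStepA d) [start] := fun start =>
    pvGrow_eq_foldl d order [start] _ (fun x => by simp [PySem.Set.mem_ofList])
  rw [maxD_eq_foldl]
  · rw [List.foldl_map]
    simp only [key, gt_iff_lt]
  · intro c hc
    rcases List.mem_map.mp hc with ⟨s, _, rfl⟩
    rw [key s]
    exact foldlA_ne_nil d order [s] (by simp)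

-- ===== VERDICT (by name: the statement is the Claim_ definition above) =====
theorem find_largest_clique_spec : Claim_equal_find_largest_clique := by
  intro graph _
  unfold Spec_find_largest_clique find_largest_clique find_largest_clique_alt
  simp only [bigstep]
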